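-- pv_equiv track=rewrite | github.com/seanshnkim/baekjoon_algorithms | Topological Sort/pg_기말고사모의테스트2번_모범답안.py | solution
-- ===== SOURCE A (Python) =====
-- from heapq import heappush, heappop
-- from collections import defaultdict
--
-- def solution(s1, s2, k):
--
--     # 전체 그래프 생성
--     graph = defaultdict(list)
--     for X, Y in zip(s1, s2):
--         graph[Y].append(X)
--
--     answer, leafs = [], []
--
--     # K에 관련된 그래프 생성
--     stack = [k]
--     visited = set([k])
--     graph_k = defaultdict(list)
--     indegrees = defaultdict(int)
--     while stack:
--         node = stack.pop()
--         if graph[node]: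
--             for prev in graph[node]:
--                 indegrees[node] += 1
--                 graph_k[prev].append(node)
--                 if prev not in visited:
--                     stack.append(prev)
--                     visited.add(prev)
--         else:
--             heappush(leafs, node)
--
--     # 위상정렬
--     while leafs:
--         node = heappop(leafs)
--         answer.append(node)
--         for next_node in graph_k[node]:
--             indegrees[next_node] -= 1
--             if not indegrees[next_node]:
--                 heappush(leafs, next_node)
--
--     return answer
-- ===== SOURCE B (Python) =====
-- def solution(s1, s2, k):
--     # Edge list kept raw: predecessors of a node are found by scanning it,
--     # instead of pre-indexing the whole graph in a dict of adjacency lists.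
--     edges = list(zip(s1, s2))
--
--     succ = {}    # successors inside the ancestor subgraph of k
--     indeg = {}
--     ready = []   # plain list of zero-indegree nodes (no heap)
--     todo = [k]
--     seen = {k}
--     while todo:
--         node = todo.pop()
--         preds = [x for x, y in edges if y == node]
--         if not preds:
--             ready.append(node)
--             continue
--         for p in preds:
--             indeg[node] = indeg.get(node, 0) + 1
--             succ.setdefault(p, []).append(node)
--             if p not in seen:
--                 seen.add(p)
--                 todo.append(p)
--
--     # Kahn's sort, taking the minimum ready node by a linear scan each step.
--     order = []
--     while ready:
--         node = min(ready)
--         ready.remove(node)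
--         order.append(node)
--         for nxt in succ.get(node, []):
--             indeg[nxt] -= 1
--             if indeg[nxt] == 0:
--                 ready.append(nxt)
--     return order
-- ===== Notes on version B (the rewrite author's own statement) =====
-- stated objective: alternative
-- what changed: B drops A's prebuilt defaultdict adjacency index (each popped node's predecessors are found by scanning the raw zipped edge list) and replaces the heapq min-heap frontier of Kahn's topological sort with a plain list from which each step picks the minimum by a linear scan (min + remove); it trades the dict index and heap for rescans and linear minimum selection at similar overall cost on small graphs
import Mathlib
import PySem

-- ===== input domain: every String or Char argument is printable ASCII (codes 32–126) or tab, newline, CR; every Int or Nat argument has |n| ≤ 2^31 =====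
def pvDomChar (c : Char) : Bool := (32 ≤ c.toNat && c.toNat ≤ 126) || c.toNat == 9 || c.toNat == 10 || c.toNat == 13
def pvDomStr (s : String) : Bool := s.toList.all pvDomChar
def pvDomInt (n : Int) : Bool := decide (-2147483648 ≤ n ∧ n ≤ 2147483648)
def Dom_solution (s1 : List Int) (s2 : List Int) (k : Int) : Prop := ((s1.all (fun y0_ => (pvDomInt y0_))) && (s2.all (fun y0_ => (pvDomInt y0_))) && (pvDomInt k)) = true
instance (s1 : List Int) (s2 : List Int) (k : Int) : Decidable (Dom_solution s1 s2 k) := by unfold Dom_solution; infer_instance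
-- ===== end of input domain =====

-- B drops A's prebuilt adjacency dict (predecessors are found by scanning the raw edge list
-- per node) and replaces the heapq frontier by a plain list scanned for its minimum (simpler).

-- ===== PORT A =====
-- graph = defaultdict(list); for X, Y in zip(s1, s2): graph[Y].append(X)
def pvGraph (s1 s2 : List Int) : PySem.Dict Int (List Int) :=
  (s1.zip s2).foldl (fun g p => g.modify p.2 [] (fun l => l ++ [p.1])) PySem.Dict.empty

-- A's ancestor-subgraph DFS; Python's dynamic `while stack` loop becomes fuel recursion
-- (fuel chosen ≥ the number of pops, see `solution`); stack.pop() pops the LAST element;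
-- heappush into `leafs` is modelled as sorted insertion (observably exact for an int heap).
def pvDfsA (g : PySem.Dict Int (List Int)) :
    Nat → List Int → PySem.Set Int → PySem.Dict Int (List Int) → PySem.Dict Int Int → List Int →
    PySem.Dict Int (List Int) × PySem.Dict Int Int × List Int
  | 0, _, _, gk, ind, leafs => (gk, ind, leafs)
  | fuel+1, stack, vis, gk, ind, leafs =>
    match stack.getLast? with
    | none => (gk, ind, leafs)
    | some node =>
      let stack' := stack.dropLast
      let preds := g.getD node []
      if preds.isEmpty then
        pvDfsA g fuel stack' vis gk ind (List.orderedInsert (· ≤ ·) node leafs)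
      else
        let st := preds.foldl
          (fun (s : PySem.Dict Int (List Int) × PySem.Dict Int Int × List Int × PySem.Set Int) prev =>
            let ind' := s.2.1.modify node 0 (fun v => v + 1)
            let gk' := s.1.modify prev [] (fun l => l ++ [node])
            if PySem.Set.contains s.2.2.2 prev then (gk', ind', s.2.2.1, s.2.2.2)
            else (gk', ind', s.2.2.1 ++ [prev], PySem.Set.add s.2.2.2 prev))
          (gk, ind, stack', vis)
        pvDfsA g fuel st.2.2.1 st.2.2.2 st.1 st.2.1 leafs

-- A's topological loop: leafs is the heapq min-heap, modelled exactly as a sorted list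
-- (heappush = sorted insert, heappop = head)
def pvTopoA (gk : PySem.Dict Int (List Int)) :
    Nat → PySem.Dict Int Int → List Int → List Int → List Int
  | 0, _, _, ans => ans
  | fuel+1, ind, heap, ans =>
    match heap with
    | [] => ans
    | node :: rest =>
      let st := (gk.getD node []).foldl
        (fun (s : PySem.Dict Int Int × List Int) nx =>
          let ind' := s.1.modify nx 0 (fun v => v - 1)
          if ind'.getD nx 0 == 0 then (ind', List.orderedInsert (· ≤ ·) nx s.2)
          else (ind', s.2))
        (ind, rest)
      pvTopoA gk fuel st.1 st.2 (ans ++ [node])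

def solution (s1 : List Int) (s2 : List Int) (k : Int) : List Int :=
  let g := pvGraph s1 s2
  let st := pvDfsA g (s1.length + 1) [k] (PySem.Set.ofList [k]) PySem.Dict.empty PySem.Dict.empty []
  pvTopoA st.1 (s1.length + st.2.2.length + 1) st.2.1 st.2.2 []

-- ===== PORT B =====
-- preds = [x for x, y in edges if y == node]
def pvPredsB (edges : List (Int × Int)) (node : Int) : List Int :=
  (edges.filter (fun e => e.2 == node)).map (fun e => e.1)

-- the `for p in preds:` body; `indeg[node] = indeg.get(node, 0) + 1` is insert,
-- `succ.setdefault(p, []).append(node)` is setdefault followed by an in-place append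
def pvScanB (node : Int) :
    List Int → PySem.Dict Int (List Int) → PySem.Dict Int Int → List Int → PySem.Set Int →
    PySem.Dict Int (List Int) × PySem.Dict Int Int × List Int × PySem.Set Int
  | [], succ, indeg, todo, seen => (succ, indeg, todo, seen)
  | p :: ps, succ, indeg, todo, seen =>
    let indeg' := indeg.insert node (indeg.getD node 0 + 1)
    let succ' := (succ.setdefault p []).modify p [] (fun l => l ++ [node])
    if PySem.Set.contains seen p then pvScanB node ps succ' indeg' todo seen
    else pvScanB node ps succ' indeg' (todo ++ [p]) (PySem.Set.add seen p)

-- the `while todo:` worklist (fuel recursion; todo.pop() pops the LAST element)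
def pvDfsB (edges : List (Int × Int)) :
    Nat → List Int → PySem.Set Int → PySem.Dict Int (List Int) → PySem.Dict Int Int → List Int →
    PySem.Dict Int (List Int) × PySem.Dict Int Int × List Int
  | 0, _, _, succ, indeg, ready => (succ, indeg, ready)
  | fuel+1, todo, seen, succ, indeg, ready =>
    match todo.getLast? with
    | none => (succ, indeg, ready)
    | some node =>
      let preds := pvPredsB edges node
      if preds.isEmpty then
        pvDfsB edges fuel todo.dropLast seen succ indeg (ready ++ [node])
      else
        let st := pvScanB node preds succ indeg todo.dropLast seen
        pvDfsB edges fuel st.2.2.1 st.2.2.2 st.1 st.2.1 ready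

-- the `for nxt in succ.get(node, []):` body; `indeg[nxt] -= 1` is exact here because every
-- successor already has an indegree entry (it was counted when it was scanned)
def pvEmitB : List Int → PySem.Dict Int Int → List Int → PySem.Dict Int Int × List Int
  | [], indeg, ready => (indeg, ready)
  | nxt :: rest, indeg, ready =>
    let indeg' := indeg.insert nxt (indeg.getD nxt 0 - 1)
    if indeg'.getD nxt 0 == 0 then pvEmitB rest indeg' (ready ++ [nxt])
    else pvEmitB rest indeg' ready

-- the `while ready:` loop: node = min(ready), ready.remove(node) removes the first occurrence
def pvTopoB (succ : PySem.Dict Int (List Int)) :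
    Nat → PySem.Dict Int Int → List Int → List Int → List Int
  | 0, _, _, order => order
  | fuel+1, indeg, ready, order =>
    match PySem.List.min? ready (fun x => x) with
    | none => order
    | some node =>
      let st := pvEmitB (succ.getD node []) indeg (ready.erase node)
      pvTopoB succ fuel st.1 st.2 (order ++ [node])

def solution_alt (s1 : List Int) (s2 : List Int) (k : Int) : List Int :=
  let edges := s1.zip s2
  let st := pvDfsB edges (s1.length + 1) [k] (PySem.Set.ofList [k]) PySem.Dict.empty PySem.Dict.empty []
  pvTopoB st.1 (s1.length + st.2.2.length + 1) st.2.1 st.2.2 []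

-- ===== PRECONDITION & SPEC =====
def Spec_solution (s1 : List Int) (s2 : List Int) (k : Int) (out : List Int) : Prop := out = solution_alt s1 s2 k
instance (s1 : List Int) (s2 : List Int) (k : Int) (out : List Int) : Decidable (Spec_solution s1 s2 k out) := by unfold Spec_solution; infer_instance

-- ===== CLAIM (what is proved, stated in full; the proofs are below) =====
def Claim_equal_solution : Prop := ∀ (s1 : List Int) (s2 : List Int) (k : Int), Dom_solution s1 s2 k → Spec_solution s1 s2 k (solution s1 s2 k)

-- ===== LEMMAS AND PROOFS =====

lemma pvModifyL_eq (d : PySem.Dict Int (List Int)) (k0 : Int) (f : List Int → List Int) :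
    d.modify k0 [] f = d.insert k0 (f (d.getD k0 [])) := rfl

-- setdefault-then-append is A's single modify-append
lemma pvSetdefault_modify (d : PySem.Dict Int (List Int)) (p : Int) (f : List Int → List Int) :
    (d.setdefault p []).modify p [] f = d.modify p [] f := by
  by_cases h : d.contains p = true
  · rw [PySem.Dict.setdefault_of_contains d ([] : List Int) h]
  · rw [PySem.Dict.setdefault_of_not_contains d ([] : List Int) (by simpa using h),
      pvModifyL_eq, pvModifyL_eq, PySem.Dict.getD_insert_self, PySem.Dict.insert_insert_self]
    have hg : d.get? p = none := by
      rw [PySem.Dict.get?_eq_none_iff_contains]; simpa using h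
    have hd : d.getD p [] = [] := by simp [PySem.Dict.getD, hg]
    rw [hd]

-- A's precomputed adjacency lookup is B's per-node scan of the edge list
lemma pvGraph_getD_aux (l : List (Int × Int)) :
    ∀ (d : PySem.Dict Int (List Int)) (node : Int),
      (l.foldl (fun g p => g.modify p.2 [] (fun t => t ++ [p.1])) d).getD node [] =
        d.getD node [] ++ (l.filter (fun e => e.2 == node)).map (fun e => e.1) := by
  induction l with
  | nil => intro d node; simp
  | cons a t ih =>
    intro d node
    simp only [List.foldl_cons, ih, List.filter_cons]
    by_cases h : a.2 = node
    · simp [h]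
    · simp [PySem.Dict.getD_modify, h, Ne.symm h]

lemma pvGraph_getD (s1 s2 : List Int) (node : Int) :
    (pvGraph s1 s2).getD node [] = pvPredsB (s1.zip s2) node := by
  unfold pvGraph pvPredsB
  rw [pvGraph_getD_aux]
  simp [PySem.Dict.getD, PySem.Dict.empty, PySem.Dict.get?]

-- the two inner pred-scans coincide
lemma pvScan_eq (node : Int) (preds : List Int) :
    ∀ (gk : PySem.Dict Int (List Int)) (ind : PySem.Dict Int Int) (st : List Int) (vis : PySem.Set Int),
      preds.foldl
        (fun (s : PySem.Dict Int (List Int) × PySem.Dict Int Int × List Int × PySem.Set Int) prev =>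
          let ind' := s.2.1.modify node 0 (fun v => v + 1)
          let gk' := s.1.modify prev [] (fun l => l ++ [node])
          if PySem.Set.contains s.2.2.2 prev then (gk', ind', s.2.2.1, s.2.2.2)
          else (gk', ind', s.2.2.1 ++ [prev], PySem.Set.add s.2.2.2 prev))
        (gk, ind, st, vis)
      = pvScanB node preds gk ind st vis := by
  induction preds with
  | nil => intro gk ind st vis; rfl
  | cons p ps ih =>
    intro gk ind st vis
    simp only [List.foldl_cons, pvScanB, pvSetdefault_modify]
    rw [show ind.insert node (ind.getD node 0 + 1) = ind.modify node 0 (fun v => v + 1) from rfl]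
    by_cases h : PySem.Set.contains vis p = true
    · simp only [h, if_true]; exact ih _ _ _ _
    · simp only [eq_false_of_ne_true h]; exact ih _ _ _ _

-- the two worklist phases agree: same subgraph and indegrees, and the frontiers are a
-- sorted list (A's heap) and a permutation of it (B's append-order list)
lemma pvDfs_rel (s1 s2 : List Int) :
    ∀ (fuel : Nat) (stack : List Int) (vis : PySem.Set Int)
      (gk : PySem.Dict Int (List Int)) (ind : PySem.Dict Int Int) (la lb : List Int),
      la.Pairwise (· ≤ ·) → la.Perm lb →
      (pvDfsA (pvGraph s1 s2) fuel stack vis gk ind la).1 =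
        (pvDfsB (s1.zip s2) fuel stack vis gk ind lb).1 ∧
      (pvDfsA (pvGraph s1 s2) fuel stack vis gk ind la).2.1 =
        (pvDfsB (s1.zip s2) fuel stack vis gk ind lb).2.1 ∧
      (pvDfsA (pvGraph s1 s2) fuel stack vis gk ind la).2.2.Pairwise (· ≤ ·) ∧
      (pvDfsA (pvGraph s1 s2) fuel stack vis gk ind la).2.2.Perm
        (pvDfsB (s1.zip s2) fuel stack vis gk ind lb).2.2 := by
  intro fuel
  induction fuel with
  | zero => intro stack vis gk ind la lb hs hp; exact ⟨rfl, rfl, hs, hp⟩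
  | succ n ih =>
    intro stack vis gk ind la lb hs hp
    simp only [pvDfsA, pvDfsB]
    cases hL : stack.getLast? with
    | none => exact ⟨rfl, rfl, hs, hp⟩
    | some node =>
      simp only [pvGraph_getD, pvScan_eq]
      by_cases hpred : (pvPredsB (s1.zip s2) node).isEmpty = true
      · simp only [hpred, if_true]
        exact ih _ _ _ _ _ _ (List.Pairwise.orderedInsert node la hs)
          ((List.perm_orderedInsert _ node la).trans
            ((hp.cons node).trans (List.perm_append_singleton node lb).symm))
      · simp only [eq_false_of_ne_true hpred]
        exact ih _ _ _ _ _ _ hs hp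

-- a sorted list's head is what min() finds in any permutation of it
lemma pvMin_of_perm_sorted {node : Int} {rest avail : List Int}
    (hs : (node :: rest).Pairwise (· ≤ ·)) (hp : (node :: rest).Perm avail) :
    PySem.List.min? avail (fun x => x) = some node := by
  cases hm : PySem.List.min? avail (fun x => x) with
  | none =>
    have : avail = [] := (PySem.List.min?_eq_none_iff _ _).mp hm
    subst this
    exact absurd hp.length_eq (by simp)
  | some m =>
    have hmem : m ∈ avail := PySem.List.min?_mem hm
    have hmin : ∀ y ∈ avail, m ≤ y := fun y hy => PySem.List.min?_isMin hm y hy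
    have hm1 : m ∈ node :: rest := hp.mem_iff.mpr hmem
    have h1 : node ≤ m := by
      rcases hm1 with _ | hm1
      · rfl
      · exact List.rel_of_pairwise_cons hs (by assumption)
    have h2 : m ≤ node := hmin node (hp.mem_iff.mp (List.mem_cons_self))
    rw [le_antisymm h1 h2]

-- the inner successor loops: equal indegrees, sorted frontier vs its permutation
lemma pvEmit_rel (l : List Int) :
    ∀ (ind : PySem.Dict Int Int) (ha hb : List Int),
      ha.Pairwise (· ≤ ·) → ha.Perm hb →
      (l.foldl (fun (s : PySem.Dict Int Int × List Int) nx =>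
          let ind' := s.1.modify nx 0 (fun v => v - 1)
          if ind'.getD nx 0 == 0 then (ind', List.orderedInsert (· ≤ ·) nx s.2)
          else (ind', s.2)) (ind, ha)).1 = (pvEmitB l ind hb).1 ∧
      (l.foldl (fun (s : PySem.Dict Int Int × List Int) nx =>
          let ind' := s.1.modify nx 0 (fun v => v - 1)
          if ind'.getD nx 0 == 0 then (ind', List.orderedInsert (· ≤ ·) nx s.2)
          else (ind', s.2)) (ind, ha)).2.Pairwise (· ≤ ·) ∧
      (l.foldl (fun (s : PySem.Dict Int Int × List Int) nx =>
          let ind' := s.1.modify nx 0 (fun v => v - 1)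
          if ind'.getD nx 0 == 0 then (ind', List.orderedInsert (· ≤ ·) nx s.2)
          else (ind', s.2)) (ind, ha)).2.Perm (pvEmitB l ind hb).2 := by
  induction l with
  | nil => intro ind ha hb hs hp; exact ⟨rfl, hs, hp⟩
  | cons x t ih =>
    intro ind ha hb hs hp
    simp only [List.foldl_cons, pvEmitB]
    rw [show ind.insert x (ind.getD x 0 - 1) = ind.modify x 0 (fun v => v - 1) from rfl]
    by_cases h : ((ind.modify x 0 (fun v => v - 1)).getD x 0 == 0) = true
    · simp only [h, if_true]
      exact ih _ _ _ (List.Pairwise.orderedInsert x ha hs)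
        ((List.perm_orderedInsert _ x ha).trans ((hp.cons x).trans (List.perm_append_singleton x hb).symm))
    · simp only [eq_false_of_ne_true h]
      exact ih _ _ _ hs hp

-- the topological loops agree whenever the heap is sorted and the ready list permutes it
lemma pvTopo_rel (gk : PySem.Dict Int (List Int)) :
    ∀ (fuel : Nat) (ind : PySem.Dict Int Int) (heap avail ans : List Int),
      heap.Pairwise (· ≤ ·) → heap.Perm avail →
      pvTopoA gk fuel ind heap ans = pvTopoB gk fuel ind avail ans := by
  intro fuel
  induction fuel with
  | zero => intro ind heap avail ans _ _; rfl
  | succ n ih =>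
    intro ind heap avail ans hs hp
    cases heap with
    | nil =>
      have : avail = [] := hp.symm.eq_nil
      subst this
      simp [pvTopoA, pvTopoB, PySem.List.min?]
    | cons node rest =>
      have hmin := pvMin_of_perm_sorted hs hp
      have herase : rest.Perm (avail.erase node) := by
        have := hp.erase node
        rwa [List.erase_cons_head] at this
      simp only [pvTopoA, pvTopoB, hmin]
      have hrel := pvEmit_rel (gk.getD node []) ind rest (avail.erase node)
        (List.Pairwise.of_cons hs) herase
      rw [hrel.1] at *
      exact (by rw [← hrel.1]; exact ih _ _ _ _ hrel.2.1 hrel.2.2)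

-- ===== VERDICT (by name: the statement is the Claim_ definition above) =====
theorem solution_spec : Claim_equal_solution := by
  intro s1 s2 k _
  unfold Spec_solution
  simp only [solution, solution_alt]
  have hd := pvDfs_rel s1 s2 (s1.length + 1) [k] (PySem.Set.ofList [k])
    PySem.Dict.empty PySem.Dict.empty [] [] List.Pairwise.nil (List.Perm.refl [])
  rw [hd.1, hd.2.1, hd.2.2.2.length_eq]
  exact pvTopo_rel _ _ _ _ _ [] hd.2.2.1 hd.2.2.2
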